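-- pv_equiv track=rewrite | github.com/billy-starks/aoc2021 | 3/main.py | do_one_count
-- ===== SOURCE A (Python) =====
-- def do_one_count(data):
-- 	# Count the number of 1's for each bit position
-- 	# Bit position to count-of-1's dictionary
-- 	one_count_dict = {}
-- 	for line in data:
-- 		pos = 0
-- 		while pos < len(line):
-- 			one_count_dict[pos] = one_count_dict.get(pos, 0) + (1 if line[pos] == "1" else 0)
-- 			pos += 1
-- 	return one_count_dict
-- ===== SOURCE B (Python) =====
-- def do_one_count(data):
-- 	# Column-wise: compute the width once, then count '1's per position in one comprehension.
-- 	width = max(map(len, data), default=0)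
-- 	return {i: sum(1 for line in data if i < len(line) and line[i] == "1") for i in range(width)}
-- ===== Notes on version B (the rewrite author's own statement) =====
-- stated objective: alternative
-- what changed: Replaces the per-line while loop that mutates a shared position->count dict with a column-wise dict comprehension: the width is computed once and each position's count is a single pass counting lines with a '1' there.
import Mathlib
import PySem

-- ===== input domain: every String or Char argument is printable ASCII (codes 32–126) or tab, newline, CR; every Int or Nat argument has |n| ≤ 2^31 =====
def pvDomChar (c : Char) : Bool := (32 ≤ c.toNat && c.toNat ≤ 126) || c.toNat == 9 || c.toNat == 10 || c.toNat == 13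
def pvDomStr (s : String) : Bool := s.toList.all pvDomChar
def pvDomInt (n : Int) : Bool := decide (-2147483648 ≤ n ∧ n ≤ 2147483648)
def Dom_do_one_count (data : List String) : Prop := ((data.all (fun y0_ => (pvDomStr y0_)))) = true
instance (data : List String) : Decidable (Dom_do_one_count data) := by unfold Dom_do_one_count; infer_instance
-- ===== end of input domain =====

-- B replaces A's per-line while loop mutating a shared dict by a column-wise comprehension
-- (width computed once, then one count per position); objective: alternative decomposition.


-- ===== PORT A =====
-- the inner 'while pos < len(line)' loop, as structural recursion over the line's chars
def pvLineLoopA (d : PySem.Dict Int Int) (cs : List Char) (pos : Int) : PySem.Dict Int Int :=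
  match cs with
  | [] => d
  | c :: rest =>
      pvLineLoopA (d.insert pos (d.getD pos 0 + (if c = '1' then 1 else 0))) rest (pos + 1)

def do_one_count (data : List String) : List (Int × Int) :=
  (data.foldl (fun d line => pvLineLoopA d line.toList 0)
    (PySem.Dict.empty : PySem.Dict Int Int)).items

-- ===== PORT B =====
def do_one_count_alt (data : List String) : List (Int × Int) :=
  let width : Int := PySem.List.maxD (data.map PySem.Str.len) id 0
  (PySem.List.pyRange 0 width 1).map (fun i =>
    (i, ((data.countP (fun line =>
            decide (i < PySem.Str.len line) &&
            (PySem.List.pyGet? line.toList i == some '1'))) : Int)))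

-- ===== PRECONDITION & SPEC =====
def Spec_do_one_count (data : List String) (out : List (Int × Int)) : Prop := out = do_one_count_alt data
instance (data : List String) (out : List (Int × Int)) : Decidable (Spec_do_one_count data out) := by unfold Spec_do_one_count; infer_instance

-- ===== CLAIM (what is proved, stated in full; the proofs are below) =====
def Claim_equal_do_one_count : Prop := ∀ (data : List String), Dom_do_one_count data → Spec_do_one_count data (do_one_count data)

-- ===== LEMMAS AND PROOFS =====

-- canonical dict: keys 0..W-1 in order, value f k at key k
def canonD (W : Nat) (f : Nat → Int) : PySem.Dict Int Int :=
  PySem.Dict.mk ((List.range W).map (fun (k : Nat) => ((k : Int), f k)))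

def bitc (c : Char) : Int := if c = '1' then 1 else 0

def maxLen : List String → Nat
  | [] => 0
  | l :: rest => max l.toList.length (maxLen rest)

def cntOnes (data : List String) (k : Nat) : Int :=
  ((data.countP (fun l => l.toList[k]? == some '1') : Nat) : Int)

theorem canon_congr {W : Nat} {f g : Nat → Int} (h : ∀ k < W, f k = g k) :
    canonD W f = canonD W g := by
  unfold canonD
  congr 1
  exact List.map_congr_left (fun k hk => by rw [h k (List.mem_range.mp hk)])

theorem keys_canon (W : Nat) (f : Nat → Int) :
    (canonD W f).keys = (List.range W).map (fun (k : Nat) => (k : Int)) := by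
  unfold canonD
  rw [PySem.Dict.keys_mk, List.map_map]
  rfl

theorem nodup_keys_canon (W : Nat) (f : Nat → Int) : (canonD W f).keys.Nodup := by
  rw [keys_canon]
  exact List.Nodup.map (fun a b h => by exact_mod_cast h) List.nodup_range

theorem contains_canon (W : Nat) (f : Nat → Int) (p : Nat) :
    (canonD W f).contains (p : Int) = decide (p < W) := by
  rw [PySem.Dict.contains_eq_decide_mem_keys, keys_canon]
  simp

theorem getD_canon (W : Nat) (f : Nat → Int) (p : Nat) :
    (canonD W f).getD (p : Int) 0 = if p < W then f p else 0 := by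
  by_cases hp : p < W
  · rw [if_pos hp]
    have hmem : ((p : Int), f p) ∈ (canonD W f).items :=
      List.mem_map.mpr ⟨p, List.mem_range.mpr hp, rfl⟩
    exact PySem.Dict.getD_of_mem_items _ hmem (nodup_keys_canon W f) 0
  · rw [if_neg hp]
    exact PySem.Dict.getD_of_not_contains _ 0 (by rw [contains_canon]; simpa using hp)

theorem insert_canon (W : Nat) (f : Nat → Int) (pos : Nat) (h : pos ≤ W) (v : Int) :
    (canonD W f).insert (pos : Int) v
      = canonD (max W (pos + 1)) (fun k => if k = pos then v else f k) := by
  by_cases hp : pos < W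
  · have hmax : max W (pos + 1) = W := by omega
    apply PySem.Dict.ext
    rw [PySem.Dict.items_insert_of_contains _ _ (by rw [contains_canon]; simpa using hp)]
    rw [hmax]
    show ((List.range W).map (fun (k : Nat) => ((k : Int), f k))).map
        (fun p => if (p.1 == (pos : Int)) = true then ((pos : Int), v) else p)
      = (List.range W).map (fun (k : Nat) => ((k : Int), if k = pos then v else f k))
    rw [List.map_map]
    apply List.map_congr_left
    intro k hk
    by_cases hkp : k = pos
    · subst hkp; simp
    · simp [Function.comp, hkp]
  · have hpW : pos = W := by omega
    subst hpW
    have hmax : max pos (pos + 1) = pos + 1 := by omega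
    apply PySem.Dict.ext
    rw [PySem.Dict.items_insert_of_not_contains _ _ (by rw [contains_canon]; simp)]
    rw [hmax]
    show ((List.range pos).map (fun (k : Nat) => ((k : Int), f k))) ++ [((pos : Int), v)]
      = (List.range (pos + 1)).map (fun (k : Nat) => ((k : Int), if k = pos then v else f k))
    rw [List.range_succ, List.map_append]
    congr 1
    · apply List.map_congr_left
      intro k hk
      have hkp : k ≠ pos := by have := List.mem_range.mp hk; omega
      simp [hkp]
    · simp

theorem lineLoop_canon (cs : List Char) : ∀ (pos W : Nat) (f : Nat → Int), pos ≤ W →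
    pvLineLoopA (canonD W f) cs (pos : Int)
      = canonD (max W (pos + cs.length)) (fun k =>
          if pos ≤ k ∧ k < pos + cs.length then
            (if k < W then f k else 0) + bitc (cs.getD (k - pos) ' ')
          else f k) := by
  induction cs with
  | nil =>
    intro pos W f h
    show canonD W f = _
    simp only [List.length_nil]
    have hmax : max W (pos + 0) = W := by omega
    rw [hmax]
    apply canon_congr
    intro k hk
    rw [if_neg (by omega)]
  | cons c rest ih =>
    intro pos W f h
    show pvLineLoopA ((canonD W f).insert (pos : Int)
        ((canonD W f).getD (pos : Int) 0 + (if c = '1' then 1 else 0))) rest ((pos : Int) + 1) = _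
    rw [getD_canon, insert_canon W f pos h]
    have hcast : ((pos : Int) + 1) = ((pos + 1 : Nat) : Int) := by push_cast; ring
    rw [hcast, ih (pos + 1) (max W (pos + 1)) _ (by omega)]
    have hW : max (max W (pos + 1)) (pos + 1 + rest.length) = max W (pos + (c :: rest).length) := by
      simp only [List.length_cons]; omega
    rw [hW]
    apply canon_congr
    intro k hk
    by_cases hkp : k = pos
    · rw [if_neg (show ¬(pos + 1 ≤ k ∧ k < pos + 1 + rest.length) from by omega),
        if_pos hkp,
        if_pos (show pos ≤ k ∧ k < pos + (c :: rest).length by simp only [List.length_cons]; omega)]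
      simp only [hkp, Nat.sub_self, List.getD_cons_zero, bitc]
    · by_cases hbr : pos + 1 ≤ k ∧ k < pos + 1 + rest.length
      · rw [if_pos hbr,
          if_pos (show pos ≤ k ∧ k < pos + (c :: rest).length by simp only [List.length_cons]; omega)]
        rw [if_neg hkp]
        have hc : (k < max W (pos + 1)) ↔ k < W := by omega
        have hidx : k - pos = (k - (pos + 1)) + 1 := by omega
        simp only [hc, hidx, List.getD_cons_succ]
      · rw [if_neg hbr,
          if_neg (show ¬(pos ≤ k ∧ k < pos + (c :: rest).length) by simp only [List.length_cons]; omega)]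
        exact if_neg hkp

theorem lineLoop_canon0 (cs : List Char) (W : Nat) (f : Nat → Int) :
    pvLineLoopA (canonD W f) cs 0
      = canonD (max W cs.length) (fun k =>
          if k < cs.length then (if k < W then f k else 0) + bitc (cs.getD k ' ') else f k) := by
  have h := lineLoop_canon cs 0 W f (Nat.zero_le W)
  rw [Nat.cast_zero] at h
  rw [h]
  have hmax : max W (0 + cs.length) = max W cs.length := by omega
  rw [hmax]
  apply canon_congr
  intro k hk
  by_cases hkc : k < cs.length
  · rw [if_pos ⟨Nat.zero_le k, by omega⟩, if_pos hkc, Nat.sub_zero]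
  · rw [if_neg (by omega), if_neg hkc]

theorem fold_canon (data : List String) : ∀ (W : Nat) (f : Nat → Int),
    data.foldl (fun d line => pvLineLoopA d line.toList 0) (canonD W f)
      = canonD (max W (maxLen data))
          (fun k => (if k < W then f k else 0) + cntOnes data k) := by
  induction data with
  | nil =>
    intro W f
    simp only [List.foldl_nil, maxLen]
    have hmax : max W 0 = W := by omega
    rw [hmax]
    apply canon_congr
    intro k hk
    simp [cntOnes, if_pos hk]
  | cons l rest ih =>
    intro W f
    simp only [List.foldl_cons]
    rw [lineLoop_canon0, ih]
    have hW : max (max W l.toList.length) (maxLen rest) = max W (maxLen (l :: rest)) := by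
      simp only [maxLen]; omega
    rw [hW]
    apply canon_congr
    intro k hk
    have hcnt : cntOnes (l :: rest) k
        = cntOnes rest k + (if (l.toList[k]? == some '1') = true then (1 : Int) else 0) := by
      simp only [cntOnes, List.countP_cons]
      push_cast
      split_ifs <;> simp
    rw [hcnt]
    by_cases hkl : k < l.toList.length
    · rw [if_pos (by omega), if_pos hkl]
      have hbit : bitc (l.toList.getD k ' ')
          = (if (l.toList[k]? == some '1') = true then (1 : Int) else 0) := by
        rw [List.getD_eq_getElem?_getD, List.getElem?_eq_getElem hkl]
        by_cases hc : l.toList[k] = '1' <;> simp [bitc, hc]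
      rw [hbit]
      ring
    · have hnone : l.toList[k]? = none := List.getElem?_eq_none (by omega)
      rw [if_neg hkl]
      have hc : (k < max W l.toList.length) ↔ k < W := by omega
      simp only [hc, hnone]
      simp

theorem maxfold (data : List String) : ∀ (m : Int), 0 ≤ m →
    (data.map PySem.Str.len).foldl (fun a b => if a < b then b else a) m
      = max m ((maxLen data : Nat) : Int) := by
  induction data with
  | nil =>
    intro m hm
    simp only [List.map_nil, List.foldl_nil, maxLen, Nat.cast_zero]
    omega
  | cons l rest ih =>
    intro m hm
    have hl : (0 : Int) ≤ PySem.Str.len l := by rw [PySem.Str.len_eq]; positivity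
    simp only [List.map_cons, List.foldl_cons, maxLen]
    rw [ih _ (by split_ifs <;> omega)]
    rw [PySem.Str.len_eq] at *
    push_cast [Nat.cast_max]
    split_ifs <;> omega

theorem max?_id_cons : ∀ (xs : List Int) (m : Int),
    PySem.List.max? (m :: xs) id = some (xs.foldl (fun a b => if a < b then b else a) m) := by
  intro xs
  induction xs with
  | nil => intro m; rfl
  | cons x xs ih =>
    intro m
    have hstep : PySem.List.max? (m :: x :: xs) id
        = PySem.List.max? ((if m < x then x else m) :: xs) id := by
      simp only [PySem.List.max?, List.foldl_cons, id_eq]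
      rw [← apply_ite some]
      rfl
    rw [hstep, ih, List.foldl_cons]

theorem maxD_eq (data : List String) :
    PySem.List.maxD (data.map PySem.Str.len) id 0 = ((maxLen data : Nat) : Int) := by
  cases data with
  | nil => rfl
  | cons l rest =>
    have hl : (0 : Int) ≤ PySem.Str.len l := by rw [PySem.Str.len_eq]; positivity
    unfold PySem.List.maxD
    rw [List.map_cons, max?_id_cons]
    simp only [Option.getD_some]
    rw [maxfold rest (PySem.Str.len l) hl]
    simp only [maxLen]
    rw [PySem.Str.len_eq]
    push_cast [Nat.cast_max]
    omega

theorem predB_eq (k : Nat) (l : String) :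
    (decide ((k : Int) < PySem.Str.len l) && (PySem.List.pyGet? l.toList (k : Int) == some '1'))
      = (l.toList[k]? == some '1') := by
  rw [PySem.List.pyGet?_natCast, PySem.Str.len_eq]
  by_cases h : k < l.toList.length
  · rw [decide_eq_true (show ((k : Int) < (l.toList.length : Int)) from by exact_mod_cast h),
      Bool.true_and]
  · have hnone : l.toList[k]? = none := List.getElem?_eq_none (by omega)
    rw [hnone,
      decide_eq_false (show ¬((k : Int) < (l.toList.length : Int)) from by exact_mod_cast h),
      Bool.false_and]
    rfl

-- ===== VERDICT (by name: the statement is the Claim_ definition above) =====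
theorem do_one_count_spec : Claim_equal_do_one_count := by
  unfold Claim_equal_do_one_count
  intro data _
  unfold Spec_do_one_count
  have hB : do_one_count_alt data
      = (List.range (maxLen data)).map (fun (k : Nat) => ((k : Int), cntOnes data k)) := by
    unfold do_one_count_alt
    simp only [maxD_eq, PySem.List.pyRange_zero_nat, List.map_map]
    apply List.map_congr_left
    intro k hk
    simp only [Function.comp]
    simp only [predB_eq]
    simp [cntOnes]
  rw [hB]
  unfold do_one_count
  have he : (PySem.Dict.empty : PySem.Dict Int Int) = canonD 0 (fun _ => 0) := rfl
  rw [he, fold_canon]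
  have hmax : max 0 (maxLen data) = maxLen data := by omega
  rw [hmax]
  show (List.range (maxLen data)).map
      (fun (k : Nat) => ((k : Int), (if k < 0 then (0 : Int) else 0) + cntOnes data k)) = _
  apply List.map_congr_left
  intro k hk
  simp
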